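-- pv_equiv track=rewrite | github.com/nothing14yyx/Ashare | ashare/open_monitor_env.py | _merge_live_actions
-- ===== SOURCE A (Python) =====
-- def _merge_live_actions(actions: list[str]) -> str:
--     severity = {"EXIT": 3, "PAUSE": 2, "REDUCE": 1, "NONE": 0}
--     if not actions:
--         return "NONE"
--     normalized = [str(action).strip().upper() for action in actions if action]
--     if not normalized:
--         return "NONE"
--     normalized.sort(key=lambda x: severity.get(x, 0), reverse=True)
--     return normalized[0]
-- ===== SOURCE B (Python) =====
-- def _merge_live_actions(actions: list[str]) -> str:
--     if not actions:
--         return "NONE"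
--     normalized = [str(action).strip().upper() for action in actions if action]
--     if not normalized:
--         return "NONE"
--     for label in ("EXIT", "PAUSE", "REDUCE"):
--         if label in normalized:
--             return label
--     return normalized[0]
-- ===== Notes on version B (the rewrite author's own statement) =====
-- stated objective: idiomatic
-- what changed: Replaces the reverse stable sort by severity with a scan over the fixed priority tuple (EXIT, PAUSE, REDUCE) returning the first label present, falling back to the first normalized element when no known tier occurs.
import Mathlib
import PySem

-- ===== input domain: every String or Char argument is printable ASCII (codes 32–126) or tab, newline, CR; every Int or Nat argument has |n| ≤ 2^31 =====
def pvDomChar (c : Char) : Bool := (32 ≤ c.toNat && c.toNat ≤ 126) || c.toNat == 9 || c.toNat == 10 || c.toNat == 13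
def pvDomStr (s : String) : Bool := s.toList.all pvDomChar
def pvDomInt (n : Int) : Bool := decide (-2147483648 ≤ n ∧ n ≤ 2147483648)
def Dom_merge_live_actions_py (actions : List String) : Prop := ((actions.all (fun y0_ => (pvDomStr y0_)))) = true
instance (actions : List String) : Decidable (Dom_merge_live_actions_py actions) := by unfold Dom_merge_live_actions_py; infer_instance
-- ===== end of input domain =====

-- B replaces A's reverse stable sort by severity with a scan over the fixed
-- priority list ("EXIT","PAUSE","REDUCE") plus membership tests (idiomatic).

-- ===== PORT A =====
-- severity = {"EXIT": 3, "PAUSE": 2, "REDUCE": 1, "NONE": 0}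
def pvSeverity : PySem.Dict String Int :=
  PySem.Dict.ofList [("EXIT", 3), ("PAUSE", 2), ("REDUCE", 1), ("NONE", 0)]

def merge_live_actions_py (actions : List String) : String :=
  if actions = [] then "NONE"
  else
    let normalized :=
      (actions.filter (fun action => action ≠ "")).map
        (fun action => PySem.Str.upper (PySem.Str.strip action))
    if normalized = [] then "NONE"
    else
      match PySem.List.sorted normalized (fun x => pvSeverity.getD x 0) true with
      | [] => "NONE"   -- unreachable: normalized ≠ []
      | x :: _ => x

-- ===== PORT B =====
def merge_live_actions_py_alt (actions : List String) : String :=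
  if actions = [] then "NONE"
  else
    let normalized :=
      (actions.filter (fun action => action ≠ "")).map
        (fun action => PySem.Str.upper (PySem.Str.strip action))
    if normalized = [] then "NONE"
    else
      match ["EXIT", "PAUSE", "REDUCE"].find? (fun label => normalized.contains label) with
      | some label => label
      | none => normalized.headD "NONE"

-- ===== PRECONDITION & SPEC =====
def Spec_merge_live_actions_py (actions : List String) (out : String) : Prop := out = merge_live_actions_py_alt actions
instance (actions : List String) (out : String) : Decidable (Spec_merge_live_actions_py actions out) := by unfold Spec_merge_live_actions_py; infer_instance

-- ===== CLAIM (what is proved, stated in full; the proofs are below) =====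
def Claim_equal_merge_live_actions_py : Prop := ∀ (actions : List String), Dom_merge_live_actions_py actions → Spec_merge_live_actions_py actions (merge_live_actions_py actions)

-- ===== LEMMAS AND PROOFS =====

-- the four possible severity values, tied to their keys
lemma pvSev_cases (x : String) :
    x = "EXIT" ∨ x = "PAUSE" ∨ x = "REDUCE" ∨ pvSeverity.getD x 0 = 0 := by
  by_cases h1 : x = "EXIT"; · exact Or.inl h1
  by_cases h2 : x = "PAUSE"; · exact Or.inr (Or.inl h2)
  by_cases h3 : x = "REDUCE"; · exact Or.inr (Or.inr (Or.inl h3))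
  refine Or.inr (Or.inr (Or.inr ?_))
  by_cases h4 : x = "NONE"
  · subst h4; decide
  · simp [pvSeverity, PySem.Dict.ofList, PySem.Dict.update, List.foldl, PySem.Dict.getD_insert, h1, h2, h3, h4]

lemma pvSev_exit : pvSeverity.getD "EXIT" 0 = 3 := by decide
lemma pvSev_pause : pvSeverity.getD "PAUSE" 0 = 2 := by decide
lemma pvSev_reduce : pvSeverity.getD "REDUCE" 0 = 1 := by decide

theorem merge_live_actions_py_eq (actions : List String) :
    merge_live_actions_py actions = merge_live_actions_py_alt actions := by
  unfold merge_live_actions_py merge_live_actions_py_alt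
  by_cases hA : actions = []
  · simp [hA]
  simp only [hA, if_false]
  set n := (actions.filter (fun action => action ≠ "")).map
      (fun action => PySem.Str.upper (PySem.Str.strip action)) with hn
  by_cases hN : n = []
  · simp [hN]
  simp only [hN, if_false]
  -- the sorted list is nonempty
  rcases hs : PySem.List.sorted n (fun x => pvSeverity.getD x 0) true with _ | ⟨m, t⟩
  · exact absurd ((PySem.List.sorted_eq_nil_iff n _ true).mp hs) hN
  have hmax : ∀ y ∈ n, pvSeverity.getD y 0 ≤ pvSeverity.getD m 0 :=
    PySem.List.key_head_sorted_rev_ge n (fun x => pvSeverity.getD x 0) hs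
  have hmem : m ∈ n := by
    have := PySem.List.mem_sorted (xs := n) (key := fun x => pvSeverity.getD x 0)
      (rev := true) (x := m)
    rw [hs] at this
    exact this.mp (List.mem_cons_self)
  by_cases hE : "EXIT" ∈ n
  · have h3 : (3 : Int) ≤ pvSeverity.getD m 0 := pvSev_exit ▸ hmax _ hE
    have hm : m = "EXIT" := by
      rcases pvSev_cases m with h | h | h | h
      · exact h
      · rw [h, pvSev_pause] at h3; omega
      · rw [h, pvSev_reduce] at h3; omega
      · rw [h] at h3; omega
    simp [List.find?, hE, hm]
  by_cases hP : "PAUSE" ∈ n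
  · have h2 : (2 : Int) ≤ pvSeverity.getD m 0 := pvSev_pause ▸ hmax _ hP
    have hm : m = "PAUSE" := by
      rcases pvSev_cases m with h | h | h | h
      · exact absurd (h ▸ hmem) hE
      · exact h
      · rw [h, pvSev_reduce] at h2; omega
      · rw [h] at h2; omega
    simp [List.find?, hE, hP, hm]
  by_cases hR : "REDUCE" ∈ n
  · have h1 : (1 : Int) ≤ pvSeverity.getD m 0 := pvSev_reduce ▸ hmax _ hR
    have hm : m = "REDUCE" := by
      rcases pvSev_cases m with h | h | h | h
      · exact absurd (h ▸ hmem) hE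
      · exact absurd (h ▸ hmem) hP
      · exact h
      · rw [h] at h1; omega
    simp [List.find?, hE, hP, hR, hm]
  · -- no known tier present: all severities are 0, the reverse stable sort is the identity
    have hall : ∀ y ∈ n, pvSeverity.getD y 0 = 0 := by
      intro y hy
      rcases pvSev_cases y with h | h | h | h
      · exact absurd (h ▸ hy) hE
      · exact absurd (h ▸ hy) hP
      · exact absurd (h ▸ hy) hR
      · exact h
    have hid : PySem.List.sorted n (fun x => pvSeverity.getD x 0) true = n := by
      apply PySem.List.sorted_rev_eq_self_of_pairwise
      refine List.Pairwise.imp_of_mem ?_ (List.pairwise_of_forall_mem_list (fun a _ b _ => True.intro))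
      intro a b ha hb _
      rw [hall a ha, hall b hb]
    rw [hid] at hs
    rw [hs] at hE hP hR
    rw [hs]
    simp [List.find?, hE, hP, hR]

-- ===== VERDICT (by name: the statement is the Claim_ definition above) =====
theorem merge_live_actions_py_spec : Claim_equal_merge_live_actions_py := by
  intro actions _
  unfold Spec_merge_live_actions_py
  exact merge_live_actions_py_eq actions
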